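-- pv_equiv track=rewrite | github.com/JavaJobJava/CodingTest | cmkim/Programmers/스택_큐/기능개발.py | solution
-- ===== SOURCE A (Python) =====
-- def solution(progresses, speeds):
--     answer = []
--     stack = []
--     count = len(progresses)
--     for i in range(count):
--         div = (100-progresses[i])//speeds[i]
--         if progresses[i] + div == 100:
--             stack.append(div)
--         else:
--             stack.append(div+1)
--
--     idx = stack[0]
--     count = 1
--     for i in range(1, len(stack)):
--         if stack[i] > idx:
--             answer.append(count)
--             count = 1
--             idx = stack[i]
--         else:
--             count +=1
--
--     answer.append(count)
--
--
--     return answer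
-- ===== SOURCE B (Python) =====
-- def _day(p, s):
--     d = (100 - p) // s
--     return d if p + d == 100 else d + 1
--
-- def solution(progresses, speeds):
--     days = [_day(progresses[i], speeds[i]) for i in range(len(progresses))]
--     days.reverse()
--     answer = []
--     while days:
--         lead = days.pop()
--         count = 1
--         while days and days[-1] <= lead:
--             days.pop()
--             count += 1
--         answer.append(count)
--     return answer
-- ===== Notes on version B (the rewrite author's own statement) =====
-- stated objective: alternative
-- what changed: Replaces A's single indexed scan with running (count, lead) state by precomputing the per-feature day list once and then consuming it as a stack (reversed, pop from the end) with a nested while that pops and counts every element <= the batch lead.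
import Mathlib
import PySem

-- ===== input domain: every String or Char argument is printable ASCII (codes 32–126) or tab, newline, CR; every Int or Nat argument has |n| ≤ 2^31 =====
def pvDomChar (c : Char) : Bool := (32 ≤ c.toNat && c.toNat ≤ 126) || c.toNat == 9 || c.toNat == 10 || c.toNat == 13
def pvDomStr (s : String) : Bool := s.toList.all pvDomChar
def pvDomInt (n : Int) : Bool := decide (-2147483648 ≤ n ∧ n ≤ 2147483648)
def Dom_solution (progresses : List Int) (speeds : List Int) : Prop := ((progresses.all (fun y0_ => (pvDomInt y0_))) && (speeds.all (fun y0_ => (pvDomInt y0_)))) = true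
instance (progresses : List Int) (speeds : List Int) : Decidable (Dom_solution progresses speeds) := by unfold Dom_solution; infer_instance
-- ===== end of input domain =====

-- B consumes the precomputed day list as a stack (reverse + pop with a nested while) instead of A's indexed scan with running state; return-value equivalence proved on nonempty inputs where A returns.


-- ===== PORT A =====
def solution (progresses : List Int) (speeds : List Int) : List Int :=
  -- first loop: build `stack` of completion days
  let stack := (PySem.List.pyRange 0 (progresses.length : Int) 1).foldl
    (fun (st : List Int) i =>
      let div := PySem.Int.floordiv (100 - PySem.List.pyGetD progresses i 0) (PySem.List.pyGetD speeds i 0)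
      if PySem.List.pyGetD progresses i 0 + div == 100 then st ++ [div] else st ++ [div + 1]) []
  -- idx = stack[0]; count = 1  (Pre_ guarantees stack nonempty, so the default is never used)
  let r := (PySem.List.pyRange 1 (stack.length : Int) 1).foldl
    (fun (acc : List Int × Int × Int) i =>
      let v := PySem.List.pyGetD stack i 0
      if v > acc.2.2 then (acc.1 ++ [acc.2.1], 1, v) else (acc.1, acc.2.1 + 1, acc.2.2))
    ([], 1, PySem.List.pyGetD stack 0 0)
  r.1 ++ [r.2.1]

-- ===== PORT B =====
-- _day(p, s)
def altDay (p s : Int) : Int :=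
  let d := PySem.Int.floordiv (100 - p) s
  if p + d == 100 then d else d + 1

-- the inner `while days and days[-1] <= lead: days.pop(); count += 1`:
-- returns (number of popped elements, remaining stack)
def altSplit (lead : Int) : List Int → Nat × List Int
  | [] => (0, [])
  | v :: rest =>
    if v ≤ lead then
      let r := altSplit lead rest
      (r.1 + 1, r.2)
    else (0, v :: rest)

-- the outer `while days:` loop; after `days.reverse()` Python pops from the END of
-- the reversed list, i.e. consumes the original `days` from the FRONT, which is
-- exactly this head recursion. The Nat argument is a structural fuel (always called
-- with fuel = length of the list, which suffices by altSplit_length); it only makes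
-- the recursion structural, it never changes the result.
def altGo : Nat → List Int → List Int
  | _, [] => []
  | 0, _ :: _ => []
  | fuel + 1, lead :: rest =>
    let r := altSplit lead rest
    ((1 : Int) + (r.1 : Int)) :: altGo fuel r.2

def solution_alt (progresses : List Int) (speeds : List Int) : List Int :=
  let days := (PySem.List.pyRange 0 (progresses.length : Int) 1).map
    (fun i => altDay (PySem.List.pyGetD progresses i 0) (PySem.List.pyGetD speeds i 0))
  altGo days.length days

-- ===== PRECONDITION & SPEC =====
-- Pre_ is exactly where Python A returns: it raises IndexError on empty progresses
-- (stack[0]) or when speeds is shorter than progresses, and ZeroDivisionError on a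
-- zero speed that gets used.
def Pre_solution (progresses : List Int) (speeds : List Int) : Prop :=
  progresses ≠ [] ∧ progresses.length ≤ speeds.length ∧
    ∀ s ∈ speeds.take progresses.length, s ≠ 0
instance (progresses : List Int) (speeds : List Int) : Decidable (Pre_solution progresses speeds) := by
  unfold Pre_solution; infer_instance

def pvWitness_solution : List Int × List Int := ([93, 30, 55], [1, 30, 5])

def Spec_solution (progresses : List Int) (speeds : List Int) (out : List Int) : Prop := out = solution_alt progresses speeds
instance (progresses : List Int) (speeds : List Int) (out : List Int) : Decidable (Spec_solution progresses speeds out) := by unfold Spec_solution; infer_instance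

-- ===== CLAIM (what is proved, stated in full; the proofs are below) =====
def Claim_equal_solution : Prop := ∀ (progresses : List Int) (speeds : List Int), Dom_solution progresses speeds → Pre_solution progresses speeds → Spec_solution progresses speeds (solution progresses speeds)

-- ===== LEMMAS AND PROOFS =====

lemma altSplit_length (lead : Int) (l : List Int) : (altSplit lead l).2.length ≤ l.length := by
  induction l with
  | nil => simp [altSplit]
  | cons v rest ih =>
    by_cases h : v ≤ lead
    · simp only [altSplit, if_pos h]; exact Nat.le_succ_of_le ih
    · simp [altSplit, if_neg h]

-- the fuel argument of altGo is irrelevant as long as it covers the list length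
lemma altGo_fuel (f1 : Nat) : ∀ (f2 : Nat) (l : List Int), l.length ≤ f1 → l.length ≤ f2 →
    altGo f1 l = altGo f2 l := by
  induction f1 with
  | zero =>
    intro f2 l h1 _
    have : l = [] := List.length_eq_zero_iff.mp (Nat.le_zero.mp h1)
    subst this; cases f2 <;> simp [altGo]
  | succ f ih =>
    intro f2 l h1 h2
    cases l with
    | nil => cases f2 <;> simp [altGo]
    | cons lead rest =>
      cases f2 with
      | zero => simp at h2
      | succ g =>
        simp only [altGo]
        have hl := altSplit_length lead rest
        simp only [List.length_cons] at h1 h2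
        rw [ih g (altSplit lead rest).2 (by omega) (by omega)]

lemma altGo_len_cons (lead : Int) (rest : List Int) :
    altGo (lead :: rest).length (lead :: rest)
      = ((1 : Int) + ((altSplit lead rest).1 : Int))
          :: altGo (altSplit lead rest).2.length (altSplit lead rest).2 := by
  simp only [List.length_cons, altGo]
  rw [altGo_fuel rest.length (altSplit lead rest).2.length (altSplit lead rest).2
      (altSplit_length lead rest) le_rfl]

-- A's second loop, folded over the remaining day list, flushes to B's batch recursion.
lemma loopA_eq (l : List Int) (acc : List Int) (c idx : Int) :
    (l.foldl
      (fun (acc : List Int × Int × Int) v =>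
        if v > acc.2.2 then (acc.1 ++ [acc.2.1], 1, v) else (acc.1, acc.2.1 + 1, acc.2.2))
      (acc, c, idx)).1
      ++ [(l.foldl
      (fun (acc : List Int × Int × Int) v =>
        if v > acc.2.2 then (acc.1 ++ [acc.2.1], 1, v) else (acc.1, acc.2.1 + 1, acc.2.2))
      (acc, c, idx)).2.1]
    = acc ++ ((c + ((altSplit idx l).1 : Int)) :: altGo (altSplit idx l).2.length (altSplit idx l).2) := by
  induction l generalizing acc c idx with
  | nil => simp [altSplit, altGo]
  | cons v rest ih =>
    by_cases h : v > idx
    · have hs : ¬ v ≤ idx := not_le.mpr h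
      simp only [List.foldl_cons, if_pos h, altSplit, if_neg hs, ih]
      rw [← altGo_len_cons]
      simp
    · have hs : v ≤ idx := le_of_not_gt h
      simp only [List.foldl_cons, if_neg h, altSplit, if_pos hs, ih]
      push_cast
      ring_nf

lemma stack_eq (progresses speeds : List Int) :
    (PySem.List.pyRange 0 (progresses.length : Int) 1).foldl
      (fun (st : List Int) i =>
        let div := PySem.Int.floordiv (100 - PySem.List.pyGetD progresses i 0) (PySem.List.pyGetD speeds i 0)
        if PySem.List.pyGetD progresses i 0 + div == 100 then st ++ [div] else st ++ [div + 1]) []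
    = (PySem.List.pyRange 0 (progresses.length : Int) 1).map
      (fun i => altDay (PySem.List.pyGetD progresses i 0) (PySem.List.pyGetD speeds i 0)) := by
  rw [PySem.List.foldl_congr_mem
      (g := fun (st : List Int) i =>
        st ++ [altDay (PySem.List.pyGetD progresses i 0) (PySem.List.pyGetD speeds i 0)])]
  · rw [PySem.List.foldl_append_singleton_eq_map]; simp
  · intro acc x _
    simp only [altDay]
    split <;> rfl

-- ===== VERDICT (by name: the statement is the Claim_ definition above) =====
theorem solution_spec : Claim_equal_solution := by
  intro progresses speeds _ hpre
  obtain ⟨hne, -, -⟩ := hpre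
  show solution progresses speeds = solution_alt progresses speeds
  unfold solution solution_alt
  simp only [stack_eq]
  set days := (PySem.List.pyRange 0 (progresses.length : Int) 1).map
      (fun i => altDay (PySem.List.pyGetD progresses i 0) (PySem.List.pyGetD speeds i 0)) with hdays
  have hlen : days.length = progresses.length := by
    simp [hdays, PySem.List.length_pyRange_one]
  have hdne : days ≠ [] := by
    intro h
    apply hne
    have := hlen
    rw [h] at this
    exact List.length_eq_zero_iff.mp this.symm
  obtain ⟨lead, rest, hcons⟩ := List.exists_cons_of_ne_nil hdne
  rw [hcons]
  have hfold := PySem.List.foldl_pyRange_pyGetD' (xs := lead :: rest) (a := 1) (d := 0)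
    (f := fun (acc : List Int × Int × Int) v =>
        if v > acc.2.2 then (acc.1 ++ [acc.2.1], 1, v) else (acc.1, acc.2.1 + 1, acc.2.2))
    (init := ([], 1, PySem.List.pyGetD (lead :: rest) 0 0)) (by omega)
  simp only [hfold]
  simp only [PySem.List.pyGetD_zero_cons, Int.toNat_one, List.drop_one, List.tail_cons]
  rw [loopA_eq]
  rw [← altGo_len_cons]
  simp
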